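-- pv_equiv track=rewrite | github.com/Nitishkumar3/LearnForge | services/exa_search.py | rerank_chunks_simple
-- ===== SOURCE A (Python) =====
-- def rerank_chunks_simple(query, chunks, top_k=5):
--     """Simple keyword-based reranking fallback."""
--     query_words = set(query.lower().split())
--
--     scored_chunks = []
--     for chunk_data in chunks:
--         chunk_text = chunk_data.get("chunk", "").lower()
--         score = sum(1 for word in query_words if word in chunk_text)
--         scored_chunks.append((score, chunk_data))
--
--     scored_chunks.sort(key=lambda x: x[0], reverse=True)
--
--     return [chunk_data for score, chunk_data in scored_chunks[:top_k]]
-- ===== SOURCE B (Python) =====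
-- def rerank_chunks_simple(query, chunks, top_k=5):
--     """Simple keyword-based reranking fallback (bucket sort over the bounded score range)."""
--     query_words = set(query.lower().split())
--     q = len(query_words)
--
--     buckets = [[] for _ in range(q + 1)]
--     for chunk_data in chunks:
--         chunk_text = chunk_data.get("chunk", "").lower()
--         score = sum(1 for word in query_words if word in chunk_text)
--         buckets[score].append(chunk_data)
--
--     result = []
--     for s in range(q, -1, -1):
--         result.extend(buckets[s])
--     return result[:top_k]
-- ===== Notes on version B (the rewrite author's own statement) =====
-- stated objective: alternative
-- what changed: Replaces the build-score-list-then-stable-reverse-sort with a counting/bucket sort: chunks are appended into score-indexed buckets (scores are bounded by the number of query words) and the output is the buckets concatenated from highest score to lowest, then truncated to top_k.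
import Mathlib
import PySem

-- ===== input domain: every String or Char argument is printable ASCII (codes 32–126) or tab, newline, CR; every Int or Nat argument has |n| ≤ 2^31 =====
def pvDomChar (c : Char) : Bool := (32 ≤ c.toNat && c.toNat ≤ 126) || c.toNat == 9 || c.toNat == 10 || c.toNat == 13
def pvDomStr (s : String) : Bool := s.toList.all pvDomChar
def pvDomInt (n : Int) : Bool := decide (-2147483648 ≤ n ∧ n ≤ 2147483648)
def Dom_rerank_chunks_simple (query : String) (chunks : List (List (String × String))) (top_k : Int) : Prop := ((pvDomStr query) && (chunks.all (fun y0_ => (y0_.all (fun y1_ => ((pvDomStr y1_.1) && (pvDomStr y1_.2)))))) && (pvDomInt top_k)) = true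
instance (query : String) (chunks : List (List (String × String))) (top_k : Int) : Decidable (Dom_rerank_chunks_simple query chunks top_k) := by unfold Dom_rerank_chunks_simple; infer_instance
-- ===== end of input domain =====

-- B replaces A's stable reverse sort of (score, chunk) pairs by a bucket sort over the bounded
-- score range (objective: alternative algorithm; equality of outputs is proved below).

-- ===== PORT A =====
-- helpers shared by both ports (both Python versions contain these identical lines):
-- chunk_text = chunk_data.get("chunk", "").lower()
def pvChunkText (cd : List (String × String)) : String :=
  PySem.Str.lower (PySem.Dict.getD ⟨cd⟩ "chunk" "")

-- score = sum(1 for word in query_words if word in chunk_text)  (a pure count, so the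
-- unmodelled set-iteration order cannot affect it)
def pvScore (qws : List String) (textLower : String) : Nat :=
  qws.foldl (fun s w => if PySem.Str.isIn w textLower then s + 1 else s) 0

def rerank_chunks_simple (query : String) (chunks : List (List (String × String))) (top_k : Int) : List (List (String × String)) :=
  let query_words : List String := PySem.Set.ofList (PySem.Str.split₀ (PySem.Str.lower query))
  let scored_chunks : List (Nat × List (String × String)) :=
    chunks.foldl (fun acc cd => acc ++ [(pvScore query_words (pvChunkText cd), cd)]) []
  let sortedChunks := PySem.List.sorted scored_chunks (fun x => x.1) true
  (PySem.List.slice sortedChunks none (some top_k)).map (fun p => p.2)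

-- ===== PORT B =====
def rerank_chunks_simple_alt (query : String) (chunks : List (List (String × String))) (top_k : Int) : List (List (String × String)) :=
  let query_words : List String := PySem.Set.ofList (PySem.Str.split₀ (PySem.Str.lower query))
  let q := query_words.length
  -- buckets[score].append(chunk_data); 0 ≤ score ≤ q always holds, so getD/set are exact for Python's buckets[score]
  let buckets := chunks.foldl
      (fun bs cd =>
        let score := pvScore query_words (pvChunkText cd)
        bs.set score (bs.getD score [] ++ [cd]))
      (List.replicate (q + 1) ([] : List (List (String × String))))
  let result := (PySem.List.pyRange (q : Int) (-1) (-1)).foldl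
      (fun acc s => acc ++ PySem.List.pyGetD buckets s []) []
  PySem.List.slice result none (some top_k)

-- ===== PRECONDITION & SPEC =====
def Spec_rerank_chunks_simple (query : String) (chunks : List (List (String × String))) (top_k : Int) (out : List (List (String × String))) : Prop := out = rerank_chunks_simple_alt query chunks top_k
instance (query : String) (chunks : List (List (String × String))) (top_k : Int) (out : List (List (String × String))) : Decidable (Spec_rerank_chunks_simple query chunks top_k out) := by unfold Spec_rerank_chunks_simple; infer_instance

-- ===== CLAIM (what is proved, stated in full; the proofs are below) =====
def Claim_equal_rerank_chunks_simple : Prop := ∀ (query : String) (chunks : List (List (String × String))) (top_k : Int), Dom_rerank_chunks_simple query chunks top_k → Spec_rerank_chunks_simple query chunks top_k (rerank_chunks_simple query chunks top_k)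

-- ===== LEMMAS AND PROOFS =====

-- the score is at most the number of query words
lemma pvScore_aux_le (qws : List String) (t : String) (s : Nat) :
    qws.foldl (fun s w => if PySem.Str.isIn w t then s + 1 else s) s ≤ s + qws.length := by
  induction qws generalizing s with
  | nil => simp
  | cons w ws ih =>
    simp only [List.foldl_cons, List.length_cons]
    split_ifs
    · exact (ih (s + 1)).trans (by omega)
    · exact (ih s).trans (by omega)

lemma pvScore_le (qws : List String) (t : String) : pvScore qws t ≤ qws.length := by
  simpa using pvScore_aux_le qws t 0

-- insertBy unfolding
lemma insertBy_cons {α : Type} (before : α → α → Bool) (x y : α) (ys : List α) :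
    PySem.List.insertBy before x (y :: ys) =
      if before x y then x :: y :: ys else y :: PySem.List.insertBy before x ys := rfl

-- skip a prefix the element is not inserted into
lemma insertBy_append_of_forall {α : Type} (before : α → α → Bool) (x : α) (A B : List α)
    (h : ∀ y ∈ A, before x y = false) :
    PySem.List.insertBy before x (A ++ B) = A ++ PySem.List.insertBy before x B := by
  induction A with
  | nil => simp
  | cons a A ih =>
    have ha : before x a = false := h a (by simp)
    simp [insertBy_cons, ha, ih (fun y hy => h y (by simp [hy]))]

-- insert at the front of a block whose head (if any) satisfies before
lemma insertBy_front {α : Type} (before : α → α → Bool) (x : α) (B : List α)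
    (h : ∀ y ∈ B, before x y = true) :
    PySem.List.insertBy before x B = x :: B := by
  cases B with
  | nil => rfl
  | cons b bs => simp [insertBy_cons, h b (by simp)]

lemma pvFlatMap_congr {α β : Type} (l : List α) (f g : α → List β)
    (h : ∀ a ∈ l, f a = g a) : l.flatMap f = l.flatMap g := by
  induction l with
  | nil => rfl
  | cons a l ih => simp [List.flatMap_cons, h a (by simp), ih (fun a ha => h a (by simp [ha]))]

-- one insertion step keeps the descending-buckets shape
lemma insertBy_flatMap_filter {α : Type} (key : α → Nat) (x : α) (xs : List α) :
    ∀ (L : List Nat), L.Pairwise (· > ·) → key x ∈ L →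
    PySem.List.insertBy (fun a b => decide (key b < key a)) x
        (L.flatMap (fun k => xs.filter (fun y => key y == k)))
      = L.flatMap (fun k => (xs ++ [x]).filter (fun y => key y == k)) := by
  intro L
  induction L with
  | nil => intro _ hx; simp at hx
  | cons k L ihL =>
    intro hL hx
    have hgt : ∀ m ∈ L, k > m := fun m hm => (List.pairwise_cons.mp hL).1 m hm
    by_cases hk : key x = k
    · rw [List.flatMap_cons, List.flatMap_cons,
          insertBy_append_of_forall _ _ _ _ (by
            intro y hy
            have hkey : key y = k := by simpa using (List.mem_filter.mp hy).2
            show decide (key y < key x) = false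
            exact decide_eq_false (by omega)),
          insertBy_front _ _ _ (by
            intro y hy
            rcases List.mem_flatMap.mp hy with ⟨m, hm, hym⟩
            have hkey : key y = m := by simpa using (List.mem_filter.mp hym).2
            have hmk : m < k := hgt m hm
            show decide (key y < key x) = true
            exact decide_eq_true (by omega))]
      have hhead : (xs ++ [x]).filter (fun y => key y == k) =
          xs.filter (fun y => key y == k) ++ [x] := by
        simp [List.filter_append, hk]
      have htail : List.flatMap (fun m => List.filter (fun y => key y == m) (xs ++ [x])) L
          = List.flatMap (fun m => List.filter (fun y => key y == m) xs) L := by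
        apply pvFlatMap_congr
        intro m hm
        have hne : (key x == m) = false := by
          have : k > m := hgt m hm
          simp; omega
        simp [List.filter_append, hne]
      rw [hhead, htail]
      simp
    · have hx' : key x ∈ L := by
        cases List.mem_cons.mp hx with
        | inl h => exact absurd h hk
        | inr h => exact h
      rw [List.flatMap_cons, List.flatMap_cons,
          insertBy_append_of_forall _ _ _ _ (by
            intro y hy
            have hkey : key y = k := by simpa using (List.mem_filter.mp hy).2
            have hlt : key x < k := by have := hgt _ hx'; omega
            show decide (key y < key x) = false
            exact decide_eq_false (by omega)),
          ihL hL.tail hx']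
      congr 1
      have hne : (key x == k) = false := by simp [hk]
      simp [List.filter_append, hne]

-- stable reverse sort = concatenation of the key-buckets listed in strictly descending key order
lemma sorted_rev_eq_flatMap_filter {α : Type} (key : α → Nat) (xs : List α) (L : List Nat)
    (hL : L.Pairwise (· > ·)) (hmem : ∀ x ∈ xs, key x ∈ L) :
    PySem.List.sorted xs key true = L.flatMap (fun k => xs.filter (fun y => key y == k)) := by
  rw [PySem.List.sorted_rev_eq_foldl_insertBy]
  induction xs using List.reverseRecOn with
  | nil => simp
  | append_singleton xs x ih =>
    rw [List.foldl_append, List.foldl_cons, List.foldl_nil,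
        ih (fun y hy => hmem y (by simp [hy])),
        insertBy_flatMap_filter key x xs L hL (hmem x (by simp))]

-- B's buckets hold exactly the chunks of each score, in input order
lemma foldl_buckets_getD {C : Type} (f : C → Nat) (cs : List C) :
    ∀ (init : List (List C)) (s : Nat), s < init.length → (∀ c ∈ cs, f c < init.length) →
    ((cs.foldl (fun bs cd => bs.set (f cd) (bs.getD (f cd) [] ++ [cd])) init).getD s []
      = init.getD s [] ++ cs.filter (fun c => f c == s)) := by
  induction cs with
  | nil => intro init s hs _; simp
  | cons c cs ih =>
    intro init s hs hf
    rw [List.foldl_cons]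
    have hlen : (init.set (f c) (init.getD (f c) [] ++ [c])).length = init.length := by simp
    rw [ih _ s (by simpa [hlen]) (by intro c' hc'; simpa [hlen] using hf c' (by simp [hc']))]
    by_cases hcs : f c = s
    · subst hcs
      rw [List.getD_eq_getElem?_getD, List.getElem?_set_self (by omega), List.filter_cons]
      simp [List.getD_eq_getElem?_getD]
    · rw [List.getD_eq_getElem?_getD, List.getElem?_set_ne (by omega), List.filter_cons]
      have : (f c == s) = false := by simp [hcs]
      simp [this, List.getD_eq_getElem?_getD]

-- range(q, -1, -1) = [q, q-1, …, 0]
lemma pyRange_down (q : Nat) :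
    PySem.List.pyRange (q : Int) (-1) (-1) = ((List.range (q + 1)).reverse).map (fun n : Nat => (n : Int)) := by
  apply List.ext_getElem
  · simp [PySem.List.pyRange]
    omega
  · intro i h1 h2
    have hi : i < q + 1 := by simpa using h2
    rw [List.getElem_map, List.getElem_reverse, List.getElem_range]
    simp [PySem.List.pyRange]
    omega

-- xs[:b] commutes with map
lemma slice_to_map {α β : Type} (g : α → β) (xs : List α) (b : Int) :
    (PySem.List.slice xs none (some b)).map g = PySem.List.slice (xs.map g) none (some b) := by
  simp [PySem.List.slice, PySem.List.clampIdx, List.map_take]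

-- the core equality, for any score function bounded by q
lemma pvMain {C : Type} (f : C → Nat) (q : Nat) (hf : ∀ cd, f cd ≤ q)
    (chunks : List C) (top_k : Int) :
    (PySem.List.slice
        (PySem.List.sorted (chunks.foldl (fun acc cd => acc ++ [(f cd, cd)]) []) (fun x => x.1) true)
        none (some top_k)).map (fun p => p.2)
      = PySem.List.slice
          ((PySem.List.pyRange (q : Int) (-1) (-1)).foldl
            (fun (acc : List C) (s : Int) => acc ++ PySem.List.pyGetD
              (chunks.foldl (fun (bs : List (List C)) cd => bs.set (f cd) (bs.getD (f cd) [] ++ [cd]))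
                (List.replicate (q + 1) ([] : List C))) s []) [])
          none (some top_k) := by
  have hLpw : ((List.range (q + 1)).reverse).Pairwise (· > ·) := by
    rw [List.pairwise_reverse]
    simpa using List.pairwise_lt_range
  have hmemL : ∀ n, n ≤ q → n ∈ (List.range (q + 1)).reverse := by
    intro n hn; simp [List.mem_range]; omega
  -- A side
  rw [PySem.List.foldl_append_singleton_eq_map, List.nil_append,
      sorted_rev_eq_flatMap_filter (fun x : Nat × C => x.1) (chunks.map (fun cd => (f cd, cd))) ((List.range (q + 1)).reverse) hLpw (by
        intro x hx
        rcases List.mem_map.mp hx with ⟨cd, _, rfl⟩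
        exact hmemL _ (hf cd)),
      slice_to_map]
  -- B side
  rw [PySem.List.foldl_append_eq_flatMap, List.nil_append, pyRange_down, List.flatMap_map]
  congr 1
  rw [List.map_flatMap]
  apply pvFlatMap_congr
  intro k hk
  have hkq : k ≤ q := by
    have := List.mem_range.mp (List.mem_reverse.mp hk); omega
  have hbuck :
      ((chunks.foldl (fun bs cd => bs.set (f cd) (bs.getD (f cd) [] ++ [cd]))
          (List.replicate (q + 1) ([] : List C))).getD k [])
        = chunks.filter (fun c => f c == k) := by
    have hk1 : k < q + 1 := by omega
    rw [foldl_buckets_getD f chunks (List.replicate (q + 1) ([] : List C)) k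
          (by simpa using hk1)
          (by intro c _; simpa using lt_of_le_of_lt (hf c) (Nat.lt_succ_self q))]
    rw [List.getD_eq_getElem?_getD, List.getElem?_replicate]
    simp [hk1]
  calc ((chunks.map (fun cd => (f cd, cd))).filter (fun y => y.1 == k)).map (fun p => p.2)
      = chunks.filter (fun c => f c == k) := by
        simp [List.filter_map, List.map_map, Function.comp_def]
    _ = (fun s : Int => PySem.List.pyGetD
          (chunks.foldl (fun bs cd => bs.set (f cd) (bs.getD (f cd) [] ++ [cd]))
            (List.replicate (q + 1) ([] : List C))) s []) ((k : Nat) : Int) := by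
        simp only [PySem.List.pyGetD_natCast, hbuck]

-- ===== VERDICT (by name: the statement is the Claim_ definition above) =====
set_option maxHeartbeats 400000 in
theorem rerank_chunks_simple_spec : Claim_equal_rerank_chunks_simple := by
  intro query chunks top_k _
  unfold Spec_rerank_chunks_simple
  simp only [rerank_chunks_simple, rerank_chunks_simple_alt]
  exact pvMain (fun cd => pvScore (PySem.Set.ofList (PySem.Str.split₀ (PySem.Str.lower query))) (pvChunkText cd))
    (PySem.Set.ofList (PySem.Str.split₀ (PySem.Str.lower query))).length
    (fun cd => pvScore_le _ _) chunks top_k
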